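-- pv_equiv track=rewrite | github.com/jdlap/Cricut | cricut.py | btea
-- ===== SOURCE A (Python) =====
-- def btea( p, n, k_in ):
--     v = p.copy()
--     status = 2
--     word_count = 0
--
--     if( n >= 0 ):
--         word_count = n
--     else:
--         word_count = -1*n
--
--     k = k_in.copy()
--
--     DELTA=0x9e3779b9
--     MASK=0xFFFFFFFF
--
--     if( word_count == 0 ):
--         return 1
--
--     #Init variables
--     #p = 0
--     #q = 0
--     e = 0
--     z   = v[ word_count - 1 ]
--     y   = v[ 0 ]
--     s   = 0
--
--     #The core of the algorithm
--     #define MX() ( ( ( z >> 5 ) ^ ( y << 2 )) + ( ( y >> 3 ) ^ ( z << 4 ) ) ) ^ ( ( sum ^ y ) + ( k[ ( p & 3 ) ^ e ] ^ z ) )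
--
--     if ( n > 1 ):
--         q = 6 + (52 // word_count)
--         while ( q > 0 ):
--             q -= 1
--             s = (s+DELTA) & MASK
--             e = (s >> 2)&3
--             lp = 0
--             for p in range(0, word_count-1):
--                 y = v[p+1]
--
--                 v[p] = (v[p] + ((( ( z >> 5 ) ^ ( y << 2 )) + ( ( y >> 3 ) ^ ( z << 4 )) ) ^ ( ( s ^ y ) + ( k[ ( p & 3 ) ^ e ] ^ z ))))&MASK
--                 z = v[p]
--                 lp = p
--             y = v[0]
--
--             lp += 1
--             v[ word_count - 1 ] = (v[word_count - 1] + ((( ( z >> 5 ) ^ ( y << 2 )) + ( ( y >> 3 ) ^ ( z << 4 )) ) ^ ( ( s ^ y ) + ( k[ ( lp & 3 ) ^ e ] ^ z ))))&MASK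
--
--
--
--             z = v[ word_count - 1 ]
--
--         status = 0
--     #else if ( n <-1 ):
--     #{
--     #    /* Decoding Part */
--     #    q = 6 + 52 / word_count ;
--     #    sum = q * DELTA ;
--     #    while (sum != 0)
--     #    {
--     #        e = sum>>2 & 3 ;
--     #        for (p = word_count - 1 ; p > 0 ; p-- )
--     #        {
--     #            z = v[p-1];
--     #            y = v[p] -= MX();
--     #        }
--     #        z = v[ word_count -1 ] ;
--     #        y = v[0] -= MX();
--     #        sum -= DELTA ;
--     #    }
--     #    status = 0;
--     #}
--     return v
-- ===== SOURCE B (Python) =====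
-- DELTA = 0x9e3779b9
-- MASK = 0xFFFFFFFF
--
-- def _mx(z, y, s, k, j, e):
--     return (((z >> 5) ^ (y << 2)) + ((y >> 3) ^ (z << 4))) ^ ((s ^ y) + (k[(j & 3) ^ e] ^ z))
--
-- def _round(v, z, s, k):
--     # One encryption round as a functional pass: rebuild the word list front to back
--     # from pairs (word, successor) of the OLD list, then close the cycle with the
--     # freshly computed head; no in-place index assignment.
--     e = (s >> 2) & 3
--     out = []
--     for j, (cur, nxt) in enumerate(zip(v, v[1:])):
--         z = (cur + _mx(z, nxt, s, k, j, e)) & MASK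
--         out.append(z)
--     z = (v[-1] + _mx(z, out[0], s, k, len(v) - 1, e)) & MASK
--     out.append(z)
--     return out, z
--
-- def _rounds(v, z, s, q, k):
--     # Recursion over the round counter (at most 6 + 52//2 = 32 levels for n > 1).
--     if q == 0:
--         return v
--     s = (s + DELTA) & MASK
--     v, z = _round(v, z, s, k)
--     return _rounds(v, z, s, q - 1, k)
--
-- def btea(p, n, k_in):
--     word_count = abs(n)
--     if word_count == 0:
--         return 1
--     v = p.copy()
--     if n > 1:
--         head = v[:word_count]
--         v = _rounds(head, head[-1], 0, 6 + 52 // word_count, k_in.copy()) + v[word_count:]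
--     return v
-- ===== Notes on version B (the rewrite author's own statement) =====
-- stated objective: alternative
-- what changed: A mutates one long list in place (inner index loop to word_count-2 with a tracked lp plus a duplicated tail update inside a while-counter loop); B splits off the encrypted prefix once, rebuilds it functionally each round from (word, successor) pairs of the old list closing the cycle with the new head, and runs the rounds by recursion on the counter.
-- outside the precondition, e.g. on btea([], 0, []): A returns 1, B returns 1
import Mathlib
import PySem

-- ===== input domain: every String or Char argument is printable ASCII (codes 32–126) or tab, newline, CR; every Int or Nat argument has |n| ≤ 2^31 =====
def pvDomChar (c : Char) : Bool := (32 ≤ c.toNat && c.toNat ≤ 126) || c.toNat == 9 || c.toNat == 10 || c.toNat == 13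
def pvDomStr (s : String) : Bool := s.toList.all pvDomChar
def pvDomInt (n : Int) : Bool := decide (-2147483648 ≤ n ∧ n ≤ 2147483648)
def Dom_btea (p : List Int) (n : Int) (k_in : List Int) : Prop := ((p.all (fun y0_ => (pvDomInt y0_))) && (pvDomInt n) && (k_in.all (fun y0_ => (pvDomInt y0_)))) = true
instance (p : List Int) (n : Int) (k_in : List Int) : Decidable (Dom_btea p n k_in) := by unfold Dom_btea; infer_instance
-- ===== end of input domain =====

-- B replaces A's in-place index-mutating round (inner loop to word_count-2 with a tracked lp
-- plus a duplicated tail update) by a functional rebuild: each round consumes (word, successor)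
-- pairs of the old prefix and constructs a fresh list, rounds run by recursion on the counter,
-- and the untouched suffix beyond word_count is split off once; simpler decomposition, same cost.


-- ===== PORT A =====
-- inner-loop body of A: state (v, z, lp), iteration variable pp; the mixing expression is inlined
-- exactly as in A's source (it appears inlined twice in A).
def bteaStepA (k : List Int) (e s : Int) (st : List Int × Int × Int) (pp : Int) :
    List Int × Int × Int :=
  let v := st.1
  let z := st.2.1
  let y := PySem.List.pyGetD v (pp + 1) 0
  let v := PySem.List.pySetD v pp
    (PySem.Int.band
      (PySem.List.pyGetD v pp 0 +
        (PySem.Int.bxor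
          ((PySem.Int.bxor (z >>> 5) (y <<< 2)) + (PySem.Int.bxor (y >>> 3) (z <<< 4)))
          ((PySem.Int.bxor s y) +
            (PySem.Int.bxor (PySem.List.pyGetD k (PySem.Int.bxor (PySem.Int.band pp 3) e) 0) z))))
      4294967295)
  let z := PySem.List.pyGetD v pp 0
  (v, z, pp)

-- one iteration of A's while loop: state (v, z, s)
def bteaRoundA (word_count : Int) (k : List Int) (st : List Int × Int × Int) :
    List Int × Int × Int :=
  let v := st.1
  let z := st.2.1
  let s := PySem.Int.band (st.2.2 + 2654435769) 4294967295
  let e := PySem.Int.band (s >>> 2) 3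
  let lp : Int := 0
  let r := (PySem.List.pyRange 0 (word_count - 1) 1).foldl (bteaStepA k e s) (v, z, lp)
  let v := r.1
  let z := r.2.1
  let lp := r.2.2
  let y := PySem.List.pyGetD v 0 0
  let lp := lp + 1
  let v := PySem.List.pySetD v (word_count - 1)
    (PySem.Int.band
      (PySem.List.pyGetD v (word_count - 1) 0 +
        (PySem.Int.bxor
          ((PySem.Int.bxor (z >>> 5) (y <<< 2)) + (PySem.Int.bxor (y >>> 3) (z <<< 4)))
          ((PySem.Int.bxor s y) +
            (PySem.Int.bxor (PySem.List.pyGetD k (PySem.Int.bxor (PySem.Int.band lp 3) e) 0) z))))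
      4294967295)
  let z := PySem.List.pyGetD v (word_count - 1) 0
  (v, z, s)

def btea (p : List Int) (n : Int) (k_in : List Int) : List Int :=
  let v := p
  let word_count : Int := if 0 ≤ n then n else -1 * n
  let k := k_in
  if word_count = 0 then
    v  -- Python A returns the int 1 here (not a list); excluded by Pre_btea
  else
    let z := PySem.List.pyGetD v (word_count - 1) 0
    let s : Int := 0
    if 1 < n then
      -- 'q = 6 + 52 // word_count; while q > 0: q -= 1; <round>' = exactly q rounds
      let q := 6 + PySem.Int.floordiv 52 word_count
      let r := (List.range q.toNat).foldl (fun st _ => bteaRoundA word_count k st) (v, z, s)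
      r.1
    else
      v

-- ===== PORT B =====
-- B's _mx helper (indexes the key itself, as in Source B)
def bteaMx (z y s : Int) (k : List Int) (j e : Int) : Int :=
  PySem.Int.bxor
    ((PySem.Int.bxor (z >>> 5) (y <<< 2)) + (PySem.Int.bxor (y >>> 3) (z <<< 4)))
    ((PySem.Int.bxor s y) +
      (PySem.Int.bxor (PySem.List.pyGetD k (PySem.Int.bxor (PySem.Int.band j 3) e) 0) z))

-- body of Source B's 'for j, (cur, nxt) in enumerate(zip(v, v[1:]))': state (out, z)
def bteaPassB (k : List Int) (s e : Int) (st : List Int × Int) (pr : Int × Int × Int) :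
    List Int × Int :=
  let z := PySem.Int.band (pr.2.1 + bteaMx st.2 pr.2.2 s k pr.1 e) 4294967295
  (st.1 ++ [z], z)

-- Source B's _round: rebuild the word list functionally, then close the cycle with out[0]
def bteaRoundB (k : List Int) (v : List Int) (z s : Int) : List Int × Int :=
  let e := PySem.Int.band (s >>> 2) 3
  let r := (PySem.List.enumerate (v.zip (PySem.List.slice v (some 1) none)) 0).foldl
    (bteaPassB k s e) ([], z)
  let z := PySem.Int.band
    (PySem.List.pyGetD v (-1) 0 +
      bteaMx r.2 (PySem.List.pyGetD r.1 0 0) s k ((v.length : Int) - 1) e) 4294967295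
  (r.1 ++ [z], z)

-- Source B's _rounds: recursion over the round counter
def bteaRoundsB (k : List Int) : Nat → List Int → Int → Int → List Int
  | 0, v, _, _ => v
  | q + 1, v, z, s =>
    let s' := PySem.Int.band (s + 2654435769) 4294967295
    let r := bteaRoundB k v z s'
    bteaRoundsB k q r.1 r.2 s'

def btea_alt (p : List Int) (n : Int) (k_in : List Int) : List Int :=
  let word_count : Int := |n|
  if word_count = 0 then
    p  -- Python B returns the int 1 here (not a list); excluded by Pre_btea
  else if 1 < n then
    let head := PySem.List.slice p none (some word_count)
    bteaRoundsB k_in (6 + PySem.Int.floordiv 52 word_count).toNat head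
        (PySem.List.pyGetD head (-1) 0) 0
      ++ PySem.List.slice p (some word_count) none
  else
    p

-- ===== PRECONDITION & SPEC =====
-- Pre_ excludes n = 0, where Python A returns the int 1 (not a list value); the other two
-- conjuncts exclude exactly the inputs where A raises IndexError (v[word_count-1]/v[0] with
-- |n| > len(p), and — when it encrypts, n > 1 — a key of fewer than 4 words, whose index 3
-- every encryption run reaches).
def Pre_btea (p : List Int) (n : Int) (k_in : List Int) : Prop :=
  n ≠ 0 ∧ n.natAbs ≤ p.length ∧ (1 < n → 4 ≤ k_in.length)
instance (p : List Int) (n : Int) (k_in : List Int) : Decidable (Pre_btea p n k_in) := by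
  unfold Pre_btea; infer_instance

def pvWitness_btea : List Int × Int × List Int := ([1, 2], 2, [3, 4, 5, 6])

def Spec_btea (p : List Int) (n : Int) (k_in : List Int) (out : List Int) : Prop :=
  out = btea_alt p n k_in
instance (p : List Int) (n : Int) (k_in : List Int) (out : List Int) :
    Decidable (Spec_btea p n k_in out) := by unfold Spec_btea; infer_instance

-- ===== CLAIM (what is proved, stated in full; the proofs are below) =====
def Claim_equal_btea : Prop := ∀ (p : List Int) (n : Int) (k_in : List Int),
  Dom_btea p n k_in → Pre_btea p n k_in → Spec_btea p n k_in (btea p n k_in)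

-- ===== LEMMAS AND PROOFS =====

-- Common specification of one round's sequential mixing pass, by recursion on the word list
-- with one-element lookahead.  goMix keeps the (still old) last word at the end of its list
-- (A's view of the list before the tail update); goOut drops it (B's accumulator 'out').
def goMix (k : List Int) (s e : Int) : Int → Int → List Int → List Int × Int
  | z, _, [] => ([], z)
  | z, _, [x] => ([x], z)
  | z, j, x :: y :: rest =>
      let w := PySem.Int.band (x + bteaMx z y s k j e) 4294967295
      let r := goMix k s e w (j + 1) (y :: rest)
      (w :: r.1, r.2)

def goOut (k : List Int) (s e : Int) : Int → Int → List Int → List Int × Int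
  | z, _, [] => ([], z)
  | z, _, [_] => ([], z)
  | z, j, x :: y :: rest =>
      let w := PySem.Int.band (x + bteaMx z y s k j e) 4294967295
      let r := goOut k s e w (j + 1) (y :: rest)
      (w :: r.1, r.2)

lemma goMix_eq_goOut (k : List Int) (s e : Int) :
    ∀ (u : List Int) (h : u ≠ []) (z j : Int),
      goMix k s e z j u = ((goOut k s e z j u).1 ++ [u.getLast h], (goOut k s e z j u).2) := by
  intro u
  induction u with
  | nil => intro h; exact absurd rfl h
  | cons x r ih =>
    intro _ z j
    cases r with
    | nil => simp [goMix, goOut]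
    | cons y r' =>
      simp only [goMix, goOut, ih (List.cons_ne_nil y r')]
      simp [List.getLast_cons]

lemma length_goOut (k : List Int) (s e : Int) :
    ∀ (u : List Int) (z j : Int), (goOut k s e z j u).1.length = u.length - 1 := by
  intro u
  induction u with
  | nil => intro z j; simp [goOut]
  | cons x r ih =>
    intro z j
    cases r with
    | nil => simp [goOut]
    | cons y r' => simp [goOut, ih]

-- B's inner fold over enumerate(zip v v[1:]) computes goOut, appended to the accumulator.
lemma passB_fold (k : List Int) (s e : Int) :
    ∀ (u acc : List Int) (z j : Int),
      (PySem.List.enumerate (u.zip u.tail) j).foldl (bteaPassB k s e) (acc, z) =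
        (acc ++ (goOut k s e z j u).1, (goOut k s e z j u).2) := by
  intro u
  induction u with
  | nil => intro acc z j; simp [goOut, PySem.List.enumerate_nil]
  | cons x r ih =>
    intro acc z j
    cases r with
    | nil => simp [goOut, PySem.List.enumerate_nil]
    | cons y r' =>
      simp only [List.tail_cons, List.zip_cons_cons, PySem.List.enumerate_cons, List.foldl_cons]
      rw [show bteaPassB k s e (acc, z) (j, x, y) =
        (acc ++ [PySem.Int.band (x + bteaMx z y s k j e) 4294967295],
         PySem.Int.band (x + bteaMx z y s k j e) 4294967295) from rfl]
      rw [show (y :: r').zip r' = (y :: r').zip (y :: r').tail from rfl, ih]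
      simp [goOut]

-- A's inner fold over range(0, word_count-1) computes goMix on the word prefix, leaving the
-- tail beyond the word count untouched and recording the last processed index in lp.
lemma stepA_fold' (k : List Int) (e s : Int) :
    ∀ (rest pre tl : List Int) (z lp : Int), rest ≠ [] →
      (PySem.List.pyRange (pre.length : Int) ((pre.length : Int) + rest.length - 1) 1).foldl
          (bteaStepA k e s) (pre ++ rest ++ tl, z, lp) =
        (pre ++ (goMix k s e z (pre.length : Int) rest).1 ++ tl,
         (goMix k s e z (pre.length : Int) rest).2,
         if rest.length ≤ 1 then lp else (pre.length : Int) + rest.length - 2) := by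
  intro rest
  induction rest with
  | nil => intro pre tl z lp h; exact absurd rfl h
  | cons x r ih =>
    intro pre tl z lp _
    cases r with
    | nil =>
      rw [PySem.List.pyRange_one_eq_nil (by simp)]
      simp [goMix]
    | cons y r' =>
      have hlt : (pre.length : Int) < (pre.length : Int) + (x :: y :: r').length - 1 := by
        simp; omega
      rw [PySem.List.pyRange_one_cons hlt, List.foldl_cons]
      have hstep : bteaStepA k e s (pre ++ (x :: y :: r') ++ tl, z, lp) (pre.length : Int) =
          ((pre ++ [PySem.Int.band (x + bteaMx z y s k (pre.length : Int) e) 4294967295]) ++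
             (y :: r') ++ tl,
           PySem.Int.band (x + bteaMx z y s k (pre.length : Int) e) 4294967295,
           (pre.length : Int)) := by
        simp only [bteaStepA]
        have hy : PySem.List.pyGetD (pre ++ (x :: y :: r') ++ tl) ((pre.length : Int) + 1) 0
            = y := by
          have : ((pre.length : Int) + 1) = (((pre.length + 1 : Nat)) : Int) := by push_cast; ring
          rw [this, PySem.List.pyGetD_natCast]
          simp [List.getD]
        have hx : PySem.List.pyGetD (pre ++ (x :: y :: r') ++ tl) (pre.length : Int) 0 = x := by
          rw [PySem.List.pyGetD_natCast]
          simp [List.getD]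
        have hset : ∀ w : Int,
            PySem.List.pySetD (pre ++ (x :: y :: r') ++ tl) (pre.length : Int) w
              = (pre ++ [w]) ++ (y :: r') ++ tl := by
          intro w
          rw [PySem.List.pySetD_natCast]
          simp
        rw [hy, hx, hset]
        have hw : PySem.List.pyGetD ((pre ++ [PySem.Int.band
              (x + bteaMx z y s k (pre.length : Int) e) 4294967295]) ++ (y :: r') ++ tl)
            (pre.length : Int) 0
            = PySem.Int.band (x + bteaMx z y s k (pre.length : Int) e) 4294967295 := by
          rw [PySem.List.pyGetD_natCast]
          simp [List.getD]
        rw [show ((pre ++ [PySem.Int.band (x + bteaMx z y s k (pre.length:Int) e) 4294967295]) ++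
              (y :: r') ++ tl)
            = (pre ++ [PySem.Int.band (x + bteaMx z y s k (pre.length:Int) e) 4294967295] ++
              (y :: r') ++ tl) from by simp] at hw ⊢
        simp only [bteaMx] at hw ⊢
        rw [hw]
      rw [hstep]
      have hpre1 : ((pre ++ [PySem.Int.band (x + bteaMx z y s k (pre.length : Int) e)
          4294967295]).length : Int) = (pre.length : Int) + 1 := by simp
      have := ih (pre ++ [PySem.Int.band (x + bteaMx z y s k (pre.length : Int) e) 4294967295])
        tl (PySem.Int.band (x + bteaMx z y s k (pre.length : Int) e) 4294967295)
        (pre.length : Int) (List.cons_ne_nil y r')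
      rw [hpre1] at this
      rw [show (pre.length : Int) + 1 + ((y :: r').length : Int) - 1
          = (pre.length : Int) + ((x :: y :: r').length : Int) - 1 from by simp; ring] at this
      rw [this]
      simp only [goMix]
      cases r' with
      | nil => simp
      | cons a b => simp; ring

lemma length_roundB (k : List Int) (v : List Int) (z s : Int) (h : v ≠ []) :
    (bteaRoundB k v z s).1.length = v.length := by
  simp only [bteaRoundB, PySem.List.slice_from_one, passB_fold]
  simp [length_goOut]
  cases v with
  | nil => exact absurd rfl h
  | cons a b => simp

-- One round of A on (prefix ++ tail) equals one round of B on the prefix, tail untouched.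
lemma bteaRound_rel (k u tl : List Int) (z s : Int) (hu : 2 ≤ u.length) :
    bteaRoundA (u.length : Int) k (u ++ tl, z, s) =
      ((bteaRoundB k u z (PySem.Int.band (s + 2654435769) 4294967295)).1 ++ tl,
       (bteaRoundB k u z (PySem.Int.band (s + 2654435769) 4294967295)).2,
       PySem.Int.band (s + 2654435769) 4294967295) := by
  have hne : u ≠ [] := by cases u <;> simp_all
  obtain ⟨s', hs'⟩ : ∃ s', PySem.Int.band (s + 2654435769) 4294967295 = s' := ⟨_, rfl⟩
  obtain ⟨e, he⟩ : ∃ e, PySem.Int.band (s' >>> 2) 3 = e := ⟨_, rfl⟩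
  simp only [bteaRoundA, bteaRoundB, hs', he, PySem.List.slice_from_one, passB_fold]
  have hfold := stepA_fold' k e s' u [] tl z 0 hne
  simp only [List.length_nil, Nat.cast_zero, List.nil_append, zero_add] at hfold
  rw [show (u.length : Int) - 1 = 0 + (u.length : Int) - 1 from by ring] at hfold ⊢
  rw [hfold]
  rw [goMix_eq_goOut k s' e u hne]
  have hout := length_goOut k s' e u z 0
  have houtne : (goOut k s' e z 0 u).1 ≠ [] := by
    intro hnil; rw [hnil] at hout; simp at hout; omega
  have hif : ¬ (u.length ≤ 1) := by omega
  simp only [hif, if_false]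
  -- the tail update
  simp only [List.append_assoc, List.singleton_append, zero_add]
  have hy0 : PySem.List.pyGetD ((goOut k s' e z 0 u).1 ++ u.getLast hne :: tl) 0 0
      = PySem.List.pyGetD (goOut k s' e z 0 u).1 0 0 := by
    cases hgo : (goOut k s' e z 0 u).1 with
    | nil => exact absurd hgo houtne
    | cons a b => simp [PySem.List.pyGetD_zero_cons]
  have hcast : ((u.length : Int)) - 1 = (((u.length - 1 : Nat)) : Int) := by
    push_cast [Nat.cast_sub (by omega : 1 ≤ u.length)]; ring
  have hidx : ((u.length : Int)) - 2 + 1 = (u.length : Int) - 1 := by ring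
  have hlast : PySem.List.pyGetD ((goOut k s' e z 0 u).1 ++ u.getLast hne :: tl)
      ((u.length : Int) - 1) 0 = u.getLast hne := by
    rw [hcast, PySem.List.pyGetD_natCast, show u.length - 1 = (goOut k s' e z 0 u).1.length from by omega]
    simp [List.getD]
  have hset : ∀ w : Int,
      PySem.List.pySetD ((goOut k s' e z 0 u).1 ++ u.getLast hne :: tl) ((u.length : Int) - 1) w
        = (goOut k s' e z 0 u).1 ++ w :: tl := by
    intro w
    rw [hcast, PySem.List.pySetD_natCast, show u.length - 1 = (goOut k s' e z 0 u).1.length from by omega]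
    simp
  have hget_new : ∀ w : Int,
      PySem.List.pyGetD ((goOut k s' e z 0 u).1 ++ w :: tl) ((u.length : Int) - 1) 0 = w := by
    intro w
    rw [hcast, PySem.List.pyGetD_natCast, show u.length - 1 = (goOut k s' e z 0 u).1.length from by omega]
    simp [List.getD]
  have hneg1 : PySem.List.pyGetD u (-1) 0 = u.getLast hne := PySem.List.pyGetD_neg_one u 0 hne
  simp only [hidx, hy0, hlast, hset, hget_new, hneg1, bteaMx]
  simp

-- iterating A's round on (prefix ++ tail) is B's round recursion on the prefix
lemma bteaRounds_rel (k tl : List Int) :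
    ∀ (q : Nat) (u : List Int) (z s : Int), 2 ≤ u.length →
      ((fun st => bteaRoundA (u.length : Int) k st)^[q] (u ++ tl, z, s)).1
        = bteaRoundsB k q u z s ++ tl := by
  intro q
  induction q with
  | zero => intro u z s _; simp [bteaRoundsB]
  | succ q ih =>
    intro u z s hu
    rw [Function.iterate_succ_apply]
    have hne : u ≠ [] := by cases u <;> simp_all
    rw [bteaRound_rel k u tl z s hu]
    have hlen := length_roundB k u z (PySem.Int.band (s + 2654435769) 4294967295) hne
    have h2 : 2 ≤ (bteaRoundB k u z (PySem.Int.band (s + 2654435769) 4294967295)).1.length := by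
      omega
    have hfun : (fun st => bteaRoundA (u.length : Int) k st)
        = (fun st => bteaRoundA
            ((bteaRoundB k u z (PySem.Int.band (s + 2654435769) 4294967295)).1.length : Int)
            k st) := by rw [hlen]
    rw [hfun, ih _ _ _ h2]
    simp [bteaRoundsB]

-- ===== VERDICT (by name: the statement is the Claim_ definition above) =====
theorem btea_spec : Claim_equal_btea := by
  intro p n k_in _hdom hpre
  obtain ⟨hn0, hlen, _⟩ := hpre
  unfold Spec_btea btea btea_alt
  have hwc : (if 0 ≤ n then n else -1 * n) = |n| := by
    by_cases h : 0 ≤ n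
    · rw [if_pos h, abs_of_nonneg h]
    · rw [if_neg h, abs_of_neg (by omega : n < 0)]; ring
  rw [hwc]
  by_cases h0 : |n| = 0
  · simp [h0]
  · simp only [h0, if_false]
    by_cases h1 : 1 < n
    · simp only [h1, if_true]
      have hm : |n| = ((n.toNat : Nat) : Int) := by omega
      have hm2 : 2 ≤ n.toNat := by omega
      have hmp : n.toNat ≤ p.length := by omega
      have hhead : PySem.List.slice p none (some |n|) = p.take n.toNat := by
        rw [hm, PySem.List.slice_to_natCast]
      have htail : PySem.List.slice p (some |n|) none = p.drop n.toNat := by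
        rw [hm, PySem.List.slice_from_natCast]
      have hlentake : (p.take n.toNat).length = n.toNat := by simp; omega
      have hsplit : p = p.take n.toNat ++ p.drop n.toNat := (List.take_append_drop _ p).symm
      have hz : PySem.List.pyGetD p (|n| - 1) 0
          = PySem.List.pyGetD (p.take n.toNat) (-1) 0 := by
        rw [hm, show ((n.toNat : Int)) - 1 = (((n.toNat - 1 : Nat)) : Int) from by
          push_cast [Nat.cast_sub (by omega : 1 ≤ n.toNat)]; ring]
        rw [PySem.List.pyGetD_natCast]
        rw [PySem.List.pyGetD_neg_ofNat (p.take n.toNat) 1 0 (by omega) (by simp; omega)]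
        simp [List.getElem_take, show min n.toNat p.length - 1 = n.toNat - 1 from by omega,
          List.getElem?_eq_getElem (show n.toNat - 1 < p.length by omega)]
      rw [List.foldl_const]
      simp only [List.length_range]
      rw [hhead, htail, hz]
      have hmain := bteaRounds_rel k_in (p.drop n.toNat) (6 + PySem.Int.floordiv 52 |n|).toNat
        (p.take n.toNat) (PySem.List.pyGetD (p.take n.toNat) (-1) 0) 0 (by omega)
      rw [show ((p.take n.toNat).length : Int) = |n| from by rw [hlentake, hm]] at hmain
      rw [List.take_append_drop] at hmain
      exact hmain
    · simp [h1]
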